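-- pv_equiv track=rewrite | github.com/umrzoqWeb/ShaxsiyReja | main/utils.py | get_section_for_activity_type
-- ===== SOURCE A (Python) =====
-- MEZON_CATEGORIES = {
--     1: {
--         'taught': [
--             ('textbook', 'Darslik', 30),
--             ('manual', 'O‘quv/kl. qo‘llanma', 20),
--             ('mobility', 'Akademik mobilnost', 20),
--             ('method_guide', 'O‘quv-uslubiy tavsiyanoma', 10),
--             ('teaching_quality', 'Ta’lim sifati', 20),
--         ],
--         'research': [
--             ('patent', 'Ixtiroga patent', 15),
--             ('project', 'Xalqaro/Respublika loyihasi', 15),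
--             ('phd_supervision', 'PhD/DSc rahbarlik', 10),
--             ('diss_defense', 'Dissertatsiya himoyasi', 15),
--             ('monograph', 'Monografiya', 5),
--             ('scopus', 'Scopus maqola', 15),
--             ('wos', 'Web of Science', 10),
--             ('oak', 'OAK jurnal', 5),
--             ('olympiad_mentor', 'Olimpiada/tanlov rahbari', 10),
--         ],
--         'social': [
--             ('creative_circle', 'Ijodiy/sport to‘garak', 40),
--             ('media', 'OAVda ishtirok', 30),
--             ('personal_plan', 'Shaxsiy ish rejasi', 15),
--             ('discipline', 'Ijro intizomi', 15),
--         ]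
--     },
--     2: {
--         'taught': [
--             ('manual', 'O‘quv/kl. qo‘llanma', 50),
--             ('method_guide', 'O‘quv-uslubiy tavsiyanoma', 20),
--             ('teaching_quality', 'Ta’lim sifati', 30),
--         ],
--         'research': [
--             ('diss_defense', 'PhD/DSc himoyasi', 30),
--             ('monograph', 'Monografiya', 10),
--             ('scopus', 'Scopus maqola', 20),
--             ('wos', 'Web of Science', 15),
--             ('oak', 'OAK jurnal', 10),
--             ('olympiad_mentor', 'Olimpiada/tanlov rahbari', 15),
--         ],
--         'social': [
--             ('creative_circle', 'Ijodiy/sport to‘garak', 40),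
--             ('media', 'OAVda ishtirok', 30),
--             ('personal_plan', 'Shaxsiy ish rejasi', 15),
--             ('discipline', 'Ijro intizomi', 15),
--         ]
--     },
--     3: {
--         'taught': [
--             ('manual', 'O‘quv qo‘llanma', 40),
--             ('method_guide', 'O‘quv-uslubiy tavsiyanoma', 30),
--             ('teaching_quality', 'Ta’lim sifati', 30),
--         ],
--         'research': [
--             ('phd_topic_approval', 'PhD mavzusini tasdiqlash', 15),
--             ('diss_defense', 'PhD dissertatsiya himoyasi', 30),
--             ('scopus', 'Scopus maqola', 20),
--             ('wos', 'Web of Science', 10),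
--             ('oak', 'OAK jurnal', 10),
--             ('olympiad_mentor', 'Olimpiada/tanlov rahbari', 10),
--         ],
--         'social': [
--             ('creative_circle', 'Ijodiy/sport to‘garak', 40),
--             ('media', 'OAVda ishtirok', 30),
--             ('personal_plan', 'Shaxsiy ish rejasi', 15),
--             ('discipline', 'Ijro intizomi', 15),
--         ]
--     }
-- }
--
-- def get_section_for_activity_type(activity_type):
--     for cat in [1, 2, 3]:
--         if activity_type in [code for code, _, _ in MEZON_CATEGORIES[cat]['taught']]:
--             return 'taught'
--         if activity_type in [code for code, _, _ in MEZON_CATEGORIES[cat]['research']]: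
--             return 'research'
--         if activity_type in [code for code, _, _ in MEZON_CATEGORIES[cat]['social']]:
--             return 'social'
--     return None
-- ===== SOURCE B (Python) =====
-- # The code->section assignment is static, so B replaces A's per-call nested
-- # scans with a single flat lookup table (first occurrence over cat 1..3,
-- # sections taught/research/social, matching A's scan order) and one .get call.
-- SECTION_BY_CODE = {
--     'textbook': 'taught',
--     'manual': 'taught',
--     'mobility': 'taught',
--     'method_guide': 'taught',
--     'teaching_quality': 'taught',
--     'patent': 'research',
--     'project': 'research',
--     'phd_supervision': 'research',
--     'diss_defense': 'research',
--     'monograph': 'research',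
--     'scopus': 'research',
--     'wos': 'research',
--     'oak': 'research',
--     'olympiad_mentor': 'research',
--     'phd_topic_approval': 'research',
--     'creative_circle': 'social',
--     'media': 'social',
--     'personal_plan': 'social',
--     'discipline': 'social',
-- }
--
--
-- def get_section_for_activity_type(activity_type):
--     return SECTION_BY_CODE.get(activity_type)
-- ===== Notes on version B (the rewrite author's own statement) =====
-- stated objective: simpler
-- what changed: Replaces the per-call nested membership scans over MEZON_CATEGORIES with a precomputed flat code-to-section table (first occurrence in A's scan order) and a single dict .get lookup per call.
import Mathlib
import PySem

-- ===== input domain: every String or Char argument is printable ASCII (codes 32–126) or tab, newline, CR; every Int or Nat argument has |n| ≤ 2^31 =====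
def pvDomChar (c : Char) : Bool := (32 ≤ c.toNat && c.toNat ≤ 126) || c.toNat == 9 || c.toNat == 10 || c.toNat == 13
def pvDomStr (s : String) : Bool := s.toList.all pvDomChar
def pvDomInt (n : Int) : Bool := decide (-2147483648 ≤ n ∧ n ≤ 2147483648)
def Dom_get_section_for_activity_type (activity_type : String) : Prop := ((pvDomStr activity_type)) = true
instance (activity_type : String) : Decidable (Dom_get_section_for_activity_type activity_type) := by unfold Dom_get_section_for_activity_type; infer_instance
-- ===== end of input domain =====

-- B replaces A's per-call nested scans over MEZON_CATEGORIES by a precomputed flat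
-- code→section table and a single .get lookup (objective: simpler).

-- ===== PORT A =====
-- module constant MEZON_CATEGORIES, as used by A
def MEZON_CATEGORIES : PySem.Dict Int (PySem.Dict String (List (String × String × Int))) :=
  PySem.Dict.ofList
    [ (1, PySem.Dict.ofList
        [ ("taught",
            [ ("textbook", "Darslik", 30), ("manual", "O‘quv/kl. qo‘llanma", 20),
              ("mobility", "Akademik mobilnost", 20), ("method_guide", "O‘quv-uslubiy tavsiyanoma", 10),
              ("teaching_quality", "Ta’lim sifati", 20) ]),
          ("research",
            [ ("patent", "Ixtiroga patent", 15), ("project", "Xalqaro/Respublika loyihasi", 15),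
              ("phd_supervision", "PhD/DSc rahbarlik", 10), ("diss_defense", "Dissertatsiya himoyasi", 15),
              ("monograph", "Monografiya", 5), ("scopus", "Scopus maqola", 15),
              ("wos", "Web of Science", 10), ("oak", "OAK jurnal", 5),
              ("olympiad_mentor", "Olimpiada/tanlov rahbari", 10) ]),
          ("social",
            [ ("creative_circle", "Ijodiy/sport to‘garak", 40), ("media", "OAVda ishtirok", 30),
              ("personal_plan", "Shaxsiy ish rejasi", 15), ("discipline", "Ijro intizomi", 15) ]) ]),
      (2, PySem.Dict.ofList
        [ ("taught",
            [ ("manual", "O‘quv/kl. qo‘llanma", 50), ("method_guide", "O‘quv-uslubiy tavsiyanoma", 20),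
              ("teaching_quality", "Ta’lim sifati", 30) ]),
          ("research",
            [ ("diss_defense", "PhD/DSc himoyasi", 30), ("monograph", "Monografiya", 10),
              ("scopus", "Scopus maqola", 20), ("wos", "Web of Science", 15),
              ("oak", "OAK jurnal", 10), ("olympiad_mentor", "Olimpiada/tanlov rahbari", 15) ]),
          ("social",
            [ ("creative_circle", "Ijodiy/sport to‘garak", 40), ("media", "OAVda ishtirok", 30),
              ("personal_plan", "Shaxsiy ish rejasi", 15), ("discipline", "Ijro intizomi", 15) ]) ]),
      (3, PySem.Dict.ofList
        [ ("taught",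
            [ ("manual", "O‘quv qo‘llanma", 40), ("method_guide", "O‘quv-uslubiy tavsiyanoma", 30),
              ("teaching_quality", "Ta’lim sifati", 30) ]),
          ("research",
            [ ("phd_topic_approval", "PhD mavzusini tasdiqlash", 15), ("diss_defense", "PhD dissertatsiya himoyasi", 30),
              ("scopus", "Scopus maqola", 20), ("wos", "Web of Science", 10),
              ("oak", "OAK jurnal", 10), ("olympiad_mentor", "Olimpiada/tanlov rahbari", 10) ]),
          ("social",
            [ ("creative_circle", "Ijodiy/sport to‘garak", 40), ("media", "OAVda ishtirok", 30),
              ("personal_plan", "Shaxsiy ish rejasi", 15), ("discipline", "Ijro intizomi", 15) ]) ]) ]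

-- 'for cat in [1, 2, 3]' with early returns, as structural recursion over the list.
-- MEZON_CATEGORIES[cat] is ported with getD (keys 1,2,3 are always present, so no KeyError arises).
def pvA_loop (activity_type : String) : List Int → Option String
  | [] => none
  | cat :: rest =>
    let d := MEZON_CATEGORIES.getD cat PySem.Dict.empty
    if ((d.getD "taught" []).map (fun t => t.1)).contains activity_type then some "taught"
    else if ((d.getD "research" []).map (fun t => t.1)).contains activity_type then some "research"
    else if ((d.getD "social" []).map (fun t => t.1)).contains activity_type then some "social"
    else pvA_loop activity_type rest

def get_section_for_activity_type (activity_type : String) : Option String :=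
  pvA_loop activity_type [1, 2, 3]

-- ===== PORT B =====
-- B's flat literal lookup table SECTION_BY_CODE (first occurrence in A's scan order)
def SECTION_BY_CODE : PySem.Dict String String :=
  PySem.Dict.ofList
    [ ("textbook", "taught"), ("manual", "taught"), ("mobility", "taught"),
      ("method_guide", "taught"), ("teaching_quality", "taught"),
      ("patent", "research"), ("project", "research"), ("phd_supervision", "research"),
      ("diss_defense", "research"), ("monograph", "research"), ("scopus", "research"),
      ("wos", "research"), ("oak", "research"), ("olympiad_mentor", "research"),
      ("phd_topic_approval", "research"),
      ("creative_circle", "social"), ("media", "social"),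
      ("personal_plan", "social"), ("discipline", "social") ]

def get_section_for_activity_type_alt (activity_type : String) : Option String :=
  SECTION_BY_CODE.get? activity_type

-- ===== PRECONDITION & SPEC =====
def Spec_get_section_for_activity_type (activity_type : String) (out : Option String) : Prop := out = get_section_for_activity_type_alt activity_type
instance (activity_type : String) (out : Option String) : Decidable (Spec_get_section_for_activity_type activity_type out) := by unfold Spec_get_section_for_activity_type; infer_instance

-- ===== CLAIM (what is proved, stated in full; the proofs are below) =====
def Claim_equal_get_section_for_activity_type : Prop := ∀ (activity_type : String), Dom_get_section_for_activity_type activity_type → Spec_get_section_for_activity_type activity_type (get_section_for_activity_type activity_type)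

-- ===== LEMMAS AND PROOFS =====
theorem pv_codes_1_taught : (((MEZON_CATEGORIES.getD 1 PySem.Dict.empty).getD "taught" []).map (fun t => t.1)) = ["textbook", "manual", "mobility", "method_guide", "teaching_quality"] := by decide

theorem pv_codes_1_research : (((MEZON_CATEGORIES.getD 1 PySem.Dict.empty).getD "research" []).map (fun t => t.1)) = ["patent", "project", "phd_supervision", "diss_defense", "monograph", "scopus", "wos", "oak", "olympiad_mentor"] := by decide

theorem pv_codes_1_social : (((MEZON_CATEGORIES.getD 1 PySem.Dict.empty).getD "social" []).map (fun t => t.1)) = ["creative_circle", "media", "personal_plan", "discipline"] := by decide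

theorem pv_codes_2_taught : (((MEZON_CATEGORIES.getD 2 PySem.Dict.empty).getD "taught" []).map (fun t => t.1)) = ["manual", "method_guide", "teaching_quality"] := by decide

theorem pv_codes_2_research : (((MEZON_CATEGORIES.getD 2 PySem.Dict.empty).getD "research" []).map (fun t => t.1)) = ["diss_defense", "monograph", "scopus", "wos", "oak", "olympiad_mentor"] := by decide

theorem pv_codes_2_social : (((MEZON_CATEGORIES.getD 2 PySem.Dict.empty).getD "social" []).map (fun t => t.1)) = ["creative_circle", "media", "personal_plan", "discipline"] := by decide

theorem pv_codes_3_taught : (((MEZON_CATEGORIES.getD 3 PySem.Dict.empty).getD "taught" []).map (fun t => t.1)) = ["manual", "method_guide", "teaching_quality"] := by decide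

theorem pv_codes_3_research : (((MEZON_CATEGORIES.getD 3 PySem.Dict.empty).getD "research" []).map (fun t => t.1)) = ["phd_topic_approval", "diss_defense", "scopus", "wos", "oak", "olympiad_mentor"] := by decide

theorem pv_codes_3_social : (((MEZON_CATEGORIES.getD 3 PySem.Dict.empty).getD "social" []).map (fun t => t.1)) = ["creative_circle", "media", "personal_plan", "discipline"] := by decide

set_option maxRecDepth 8192 in
theorem pv_SBC_eval : SECTION_BY_CODE = PySem.Dict.mk [("textbook", "taught"), ("manual", "taught"), ("mobility", "taught"), ("method_guide", "taught"), ("teaching_quality", "taught"), ("patent", "research"), ("project", "research"), ("phd_supervision", "research"), ("diss_defense", "research"), ("monograph", "research"), ("scopus", "research"), ("wos", "research"), ("oak", "research"), ("olympiad_mentor", "research"), ("phd_topic_approval", "research"), ("creative_circle", "social"), ("media", "social"), ("personal_plan", "social"), ("discipline", "social")] := by decide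

-- ===== VERDICT (by name: the statement is the Claim_ definition above) =====
set_option maxRecDepth 8192 in
theorem get_section_for_activity_type_spec : Claim_equal_get_section_for_activity_type := by
  intro s _
  unfold Spec_get_section_for_activity_type
  by_cases h1 : s = "textbook"
  · subst h1; decide
  by_cases h2 : s = "manual"
  · subst h2; decide
  by_cases h3 : s = "mobility"
  · subst h3; decide
  by_cases h4 : s = "method_guide"
  · subst h4; decide
  by_cases h5 : s = "teaching_quality"
  · subst h5; decide
  by_cases h6 : s = "patent"
  · subst h6; decide
  by_cases h7 : s = "project"
  · subst h7; decide
  by_cases h8 : s = "phd_supervision"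
  · subst h8; decide
  by_cases h9 : s = "diss_defense"
  · subst h9; decide
  by_cases h10 : s = "monograph"
  · subst h10; decide
  by_cases h11 : s = "scopus"
  · subst h11; decide
  by_cases h12 : s = "wos"
  · subst h12; decide
  by_cases h13 : s = "oak"
  · subst h13; decide
  by_cases h14 : s = "olympiad_mentor"
  · subst h14; decide
  by_cases h15 : s = "creative_circle"
  · subst h15; decide
  by_cases h16 : s = "media"
  · subst h16; decide
  by_cases h17 : s = "personal_plan"
  · subst h17; decide
  by_cases h18 : s = "discipline"
  · subst h18; decide
  by_cases h19 : s = "phd_topic_approval"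
  · subst h19; decide
  simp [get_section_for_activity_type, get_section_for_activity_type_alt, pvA_loop, pv_codes_1_taught, pv_codes_1_research, pv_codes_1_social, pv_codes_2_taught, pv_codes_2_research, pv_codes_2_social, pv_codes_3_taught, pv_codes_3_research, pv_codes_3_social, pv_SBC_eval, PySem.Dict.get?, h1, h2, h3, h4, h5, h6, h7, h8, h9, h10, h11, h12, h13, h14, h15, h16, h17, h18, h19, Ne.symm h1, Ne.symm h2, Ne.symm h3, Ne.symm h4, Ne.symm h5, Ne.symm h6, Ne.symm h7, Ne.symm h8, Ne.symm h9, Ne.symm h10, Ne.symm h11, Ne.symm h12, Ne.symm h13, Ne.symm h14, Ne.symm h15, Ne.symm h16, Ne.symm h17, Ne.symm h18, Ne.symm h19]
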